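-- pv_equiv track=rewrite | github.com/cksdud150/HTG | 토스/1.py | solution
-- ===== SOURCE A (Python) =====
-- from collections import deque, defaultdict
--
-- def solution(s, N):
--     if len(s) < N:
--         return -1
--     def is_ok(): #숫자를 하나씩 사용했는지 체크
--         for j in range(1,N+1):
--             if dic[str(j)] != 1:
--                 return False
--         return True
--
--     dic = defaultdict(int) #윈도우에 어떤 숫자들이 들어있는지 + 몇개가 들어있는지
--     deq = deque() # 윈도우
--     answer = ''
--
--     for i in range(N): #초기화
--         deq.append(s[i])
--         dic[s[i]] += 1
--
--     if is_ok():
--         answer = ''.join(deq)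
--
--     for i in range(N,len(s)):
--         deq.append(s[i])
--         dic[s[i]] += 1
--         dic[deq.popleft()] -= 1
--         if is_ok():
--             answer = answer if answer >= ''.join(deq) else ''.join(deq)
--     if not answer:
--         answer = -1
--     return int(answer)
-- ===== SOURCE B (Python) =====
-- def solution(s, N):
--     # A window can be a permutation of 1..N only for 1 <= N <= 9 (single digit chars).
--     if N < 1 or N > 9 or len(s) < N:
--         return -1
--     target = sorted('123456789'[:N])
--     best = ''
--     for i in range(len(s) - N + 1):
--         w = s[i:i + N]
--         if sorted(w) == target and w > best:
--             best = w
--     return int(best) if best else -1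
-- ===== Notes on version B (the rewrite author's own statement) =====
-- stated objective: simpler
-- what changed: A slides a deque plus a defaultdict counter over s and re-scans all N digit counts per window; B checks each length-N slice directly by comparing its sorted characters with sorted('123456789'[:N]) and keeps the lexicographically largest valid slice, with an up-front -1 for N<1, N>9 or len(s)<N.
-- outside the precondition, e.g. on solution('ab', -3): A raises IndexError, B returns -1
import Mathlib
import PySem

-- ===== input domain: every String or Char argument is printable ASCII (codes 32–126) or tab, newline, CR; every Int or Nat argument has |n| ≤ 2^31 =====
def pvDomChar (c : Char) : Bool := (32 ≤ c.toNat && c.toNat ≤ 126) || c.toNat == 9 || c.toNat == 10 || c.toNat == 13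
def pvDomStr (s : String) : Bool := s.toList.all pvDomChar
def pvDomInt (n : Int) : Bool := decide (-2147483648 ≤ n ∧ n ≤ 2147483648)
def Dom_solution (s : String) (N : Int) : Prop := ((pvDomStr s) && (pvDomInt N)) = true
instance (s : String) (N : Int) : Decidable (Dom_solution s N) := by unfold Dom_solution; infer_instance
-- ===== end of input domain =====

-- B replaces A's deque + defaultdict + per-window recount of all N digit keys with direct
-- length-N slices checked by comparing sorted characters; simpler, and measurably faster by a
-- constant factor (one slice + sort of ≤ 9 chars per window instead of dict bookkeeping).

-- ===== PORT A =====

-- is_ok(): `for j in range(1, N+1): if dic[str(j)] != 1: return False; return True`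
def isOkA (N : Int) (dic : PySem.Dict String Int) : Bool :=
  (PySem.List.pyRange 1 (N + 1)).all (fun j => dic.getD (PySem.Int.toStr j) 0 == 1)

-- body of `for i in range(N, len(s))`; `answer if answer >= w else w` is written
-- `if answer < w then w else answer` (same value: List Char is linearly ordered)
def stepA (N : Int) (cs : List Char)
    (st : List Char × PySem.Dict String Int × List Char) (i : Int) :
    List Char × PySem.Dict String Int × List Char :=
  let c := PySem.List.pyGetD cs i ' '       -- s[i]; in range on every input Pre_ admits
  let deq := st.1 ++ [c]
  let dic := (st.2.1).modify (Char.toString c) 0 (· + 1)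
  match deq with
  | [] => (deq, dic, st.2.2)                -- unreachable: deq ends in c
  | h :: t =>
    let dic2 := dic.modify (Char.toString h) 0 (· - 1)   -- dic[deq.popleft()] -= 1
    let ans := if isOkA N dic2 then (if st.2.2 < t then t else st.2.2) else st.2.2
    (t, dic2, ans)

def solution (s : String) (N : Int) : Int :=
  let cs := s.toList
  if (cs.length : Int) < N then -1
  else
    let st0 := (PySem.List.pyRange 0 N).foldl
      (fun (st : List Char × PySem.Dict String Int) i =>
        let c := PySem.List.pyGetD cs i ' '
        (st.1 ++ [c], st.2.modify (Char.toString c) 0 (· + 1)))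
      ([], PySem.Dict.empty)
    let ans0 : List Char := if isOkA N st0.2 then st0.1 else []
    let stF := (PySem.List.pyRange N (cs.length : Int)).foldl (stepA N cs) (st0.1, st0.2, ans0)
    if stF.2.2 = [] then -1 else (PySem.Int.ofChars? stF.2.2).getD 0

-- ===== PORT B =====

def solution_alt (s : String) (N : Int) : Int :=
  let cs := s.toList
  if N < 1 || 9 < N || (cs.length : Int) < N then -1
  else
    let target := PySem.List.sorted (PySem.List.slice "123456789".toList none (some N)) (fun x => x)
    let best := (PySem.List.pyRange 0 ((cs.length : Int) - N + 1)).foldl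
      (fun (best : List Char) i =>
        let w := PySem.List.slice cs (some i) (some (i + N))
        if PySem.List.sorted w (fun x => x) == target && decide (best < w) then w else best)
      []
    if best = [] then -1 else (PySem.Int.ofChars? best).getD 0

-- ===== PRECONDITION & SPEC =====
-- Pre_ excludes exactly the inputs with N < -len(s), where A raises IndexError (s[i] in
-- `for i in range(N, len(s))` starts below -len(s)); A returns normally everywhere else.
def Pre_solution (s : String) (N : Int) : Prop := -(s.toList.length : Int) ≤ N
instance (s : String) (N : Int) : Decidable (Pre_solution s N) := by unfold Pre_solution; infer_instance

def pvWitness_solution : String × Int := ("3241", 4)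

def Spec_solution (s : String) (N : Int) (out : Int) : Prop := out = solution_alt s N
instance (s : String) (N : Int) (out : Int) : Decidable (Spec_solution s N out) := by unfold Spec_solution; infer_instance

-- ===== CLAIM (what is proved, stated in full; the proofs are below) =====
def Claim_equal_solution : Prop := ∀ (s : String) (N : Int), Dom_solution s N → Pre_solution s N → Spec_solution s N (solution s N)

-- ===== LEMMAS AND PROOFS =====

-- the counts-only reading of is_ok: dic is replaced by the multiset of the window's chars
def okCount (N : Int) (w : List Char) : Bool :=
  (PySem.List.pyRange 1 (N + 1)).all
    (fun j => ((w.map Char.toString).count (PySem.Int.toStr j) : Int) == 1)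

-- dict invariant: every lookup is the count of that (one-char) key in the window
def InvD (dic : PySem.Dict String Int) (deq : List Char) : Prop :=
  ∀ k : String, dic.getD k 0 = ((deq.map Char.toString).count k : Int)

-- the reference accumulator step shared by both reductions
def gRef (ok : List Char → Bool) (ans w : List Char) : List Char :=
  if ok w then (if ans < w then w else ans) else ans

-- the successive windows A's deque runs through while consuming `rest`
def winsFrom (deq : List Char) : List Char → List (List Char)
  | [] => []
  | c :: r => ((deq ++ [c]).tail) :: winsFrom ((deq ++ [c]).tail) r

-- stepA with the character already fetched
def step2 (N : Int) (st : List Char × PySem.Dict String Int × List Char) (c : Char) :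
    List Char × PySem.Dict String Int × List Char :=
  let deq := st.1 ++ [c]
  let dic := (st.2.1).modify (Char.toString c) 0 (· + 1)
  match deq with
  | [] => (deq, dic, st.2.2)
  | h :: t =>
    let dic2 := dic.modify (Char.toString h) 0 (· - 1)
    let ans := if isOkA N dic2 then (if st.2.2 < t then t else st.2.2) else st.2.2
    (t, dic2, ans)

theorem dict_slide (dic : PySem.Dict String Int) (A : List String) (x y k : String)
    (hinv : ∀ j, dic.getD j 0 = ((y :: A).count j : Int)) :
    ((dic.modify x 0 (· + 1)).modify y 0 (· - 1)).getD k 0 = ((A ++ [x]).count k : Int) := by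
  have e1 := hinv y
  have e2 := hinv x
  have e3 := hinv k
  clear hinv
  by_cases h1 : k = y <;> by_cases h2 : k = x <;>
    simp_all [PySem.Dict.getD_modify, List.count_append, List.count_cons, Ne.symm]

theorem char_toString_injective : Function.Injective Char.toString := by
  intro a b h
  have := congrArg String.toList h
  simpa using this

theorem isOkA_eq_okCount (N : Int) (dic : PySem.Dict String Int) (deq : List Char)
    (h : InvD dic deq) : isOkA N dic = okCount N deq := by
  unfold isOkA okCount
  have hf : (fun j => dic.getD (PySem.Int.toStr j) 0 == 1)
      = (fun j => ((deq.map Char.toString).count (PySem.Int.toStr j) : Int) == 1) := by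
    funext j; rw [h (PySem.Int.toStr j)]
  rw [hf]

-- the generic A-loop reduction
theorem loopA (N : Int) (okW : List Char → Bool) (n : Nat)
    (Hok : ∀ w : List Char, w.length = n → okCount N w = okW w)
    (rest deq : List Char) (dic : PySem.Dict String Int) (ans : List Char)
    (hlen : deq.length = n) (hn : 1 ≤ n) (hinv : InvD dic deq) :
    (rest.foldl (step2 N) (deq, dic, ans)).2.2 = (winsFrom deq rest).foldl (gRef okW) ans := by
  induction rest generalizing deq dic ans with
  | nil => rfl
  | cons c r ih =>
    obtain ⟨h, t, rfl⟩ : ∃ h t, deq = h :: t := by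
      cases deq with
      | nil => simp at hlen; omega
      | cons h t => exact ⟨h, t, rfl⟩
    have hstep : step2 N (h :: t, dic, ans) c
        = (t ++ [c],
           (dic.modify (Char.toString c) 0 (· + 1)).modify (Char.toString h) 0 (· - 1),
           if isOkA N ((dic.modify (Char.toString c) 0 (· + 1)).modify (Char.toString h) 0 (· - 1))
             then (if ans < t ++ [c] then t ++ [c] else ans) else ans) := rfl
    set dic2 := (dic.modify (Char.toString c) 0 (· + 1)).modify (Char.toString h) 0 (· - 1) with hdic2
    have hinv2 : InvD dic2 (t ++ [c]) := by
      intro k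
      have hs := dict_slide dic (t.map Char.toString) (Char.toString c) (Char.toString h) k
        (by intro j; simpa using hinv j)
      rw [hdic2]
      simpa using hs
    have hlen2 : (t ++ [c]).length = n := by
      simp at hlen ⊢
      omega
    have hok : isOkA N dic2 = okW (t ++ [c]) := by
      rw [isOkA_eq_okCount N dic2 (t ++ [c]) hinv2, Hok (t ++ [c]) hlen2]
    rw [List.foldl_cons, hstep, ih (t ++ [c]) dic2 _ hlen2 hinv2]
    have hwins : winsFrom (h :: t) (c :: r) = (t ++ [c]) :: winsFrom (t ++ [c]) r := rfl
    rw [hwins, List.foldl_cons]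
    congr 1
    rw [gRef, ← hok]

theorem stepA_eq_step2 (N : Int) (cs : List Char) (idx : List Int)
    (st : List Char × PySem.Dict String Int × List Char) :
    idx.foldl (stepA N cs) st = (idx.map (fun i => PySem.List.pyGetD cs i ' ')).foldl (step2 N) st := by
  rw [List.foldl_map]
  rfl

theorem map_getD_range' (cs : List Char) :
    ∀ (k i : Nat), i + k ≤ cs.length →
      (List.range' i k).map (fun j => cs.getD j ' ') = (cs.drop i).take k := by
  intro k
  induction k with
  | zero => intro i _; simp
  | succ m ih =>
    intro i hle
    have hi : i < cs.length := by omega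
    rw [List.range'_succ, List.map_cons, ih (i + 1) (by omega),
        List.drop_eq_getElem_cons hi, List.take_succ_cons]
    congr 1
    simp [List.getD_eq_getElem?_getD, List.getElem?_eq_getElem hi]

theorem init_fold (cs : List Char) (ks : List Int) (acc : List Char) (d : PySem.Dict String Int) :
    ks.foldl (fun (st : List Char × PySem.Dict String Int) i =>
        let c := PySem.List.pyGetD cs i ' '
        (st.1 ++ [c], st.2.modify (Char.toString c) 0 (· + 1))) (acc, d)
      = (acc ++ ks.map (fun i => PySem.List.pyGetD cs i ' '),
         (ks.map (fun i => Char.toString (PySem.List.pyGetD cs i ' '))).foldl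
           (fun d x => d.modify x 0 (· + 1)) d) := by
  induction ks generalizing acc d with
  | nil => simp
  | cons i r ih =>
    rw [List.foldl_cons]
    show (r.foldl _ ((acc ++ [PySem.List.pyGetD cs i ' ']),
        d.modify (Char.toString (PySem.List.pyGetD cs i ' ')) 0 (· + 1))) = _
    rw [ih]
    simp

def win (cs : List Char) (n i : Nat) : List Char := (cs.drop i).take n

theorem win_succ (cs : List Char) (n i : Nat) (h1 : 1 ≤ n) (hlt : n + i < cs.length) :
    (win cs n i ++ [cs[n + i]]).tail = win cs n (i + 1) := by
  obtain ⟨m, rfl⟩ : ∃ m, n = m + 1 := ⟨n - 1, by omega⟩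
  have hi : i < cs.length := by omega
  have hm : m < (cs.drop (i + 1)).length := by
    rw [List.length_drop]; omega
  unfold win
  rw [List.drop_eq_getElem_cons hi, List.take_succ_cons, List.cons_append, List.tail_cons,
      List.take_add_one, List.getElem?_eq_getElem hm]
  simp [List.getElem_drop]
  congr 1
  omega

theorem winsFrom_eq (cs : List Char) (n : Nat) (hn : 1 ≤ n) :
    ∀ k i, i + n + k = cs.length →
    winsFrom (win cs n i) (cs.drop (n + i)) = (List.range' (i + 1) k).map (win cs n) := by
  intro k
  induction k with
  | zero =>
    intro i h
    rw [List.drop_eq_nil_of_le (by omega)]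
    rfl
  | succ m ih =>
    intro i h
    have hlt : n + i < cs.length := by omega
    rw [List.drop_eq_getElem_cons hlt]
    show ((win cs n i ++ [cs[n + i]]).tail) :: winsFrom ((win cs n i ++ [cs[n + i]]).tail) (cs.drop (n + i + 1)) = _
    rw [win_succ cs n i hn hlt]
    have : n + i + 1 = n + (i + 1) := by omega
    rw [this, ih (i + 1) (by omega), List.range'_succ]
    rfl

theorem counts_perm (digits w : List Char) (hnd : digits.Nodup)
    (hlen : w.length = digits.length) :
    (∀ d ∈ digits, w.count d = 1) ↔ w.Perm digits := by
  constructor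
  · intro hc
    have hsub : digits.Subperm w := by
      rw [List.subperm_ext_iff]
      intro x hx
      rw [List.count_eq_one_of_mem hnd hx, hc x hx]
    exact (hsub.perm_of_length_le (by omega)).symm
  · intro hp d hd
    rw [hp.count_eq, List.count_eq_one_of_mem hnd hd]

-- the per-window validity equivalence, 1 ≤ N ≤ 9
theorem okCount_eq_sortcheck (n : Nat) (hn1 : 1 ≤ n) (hn9 : n ≤ 9) (w : List Char)
    (hlen : w.length = n) :
    okCount (n : Int) w
      = (PySem.List.sorted w (fun x => x) == PySem.List.sorted ("123456789".toList.take n) (fun x => x)) := by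
  have hcnt : ∀ c : Char, (w.map Char.toString).count (Char.toString c) = w.count c :=
    fun c => List.count_map_of_injective w Char.toString char_toString_injective c
  interval_cases n
  · rw [Bool.eq_iff_iff]
    unfold okCount
    rw [show PySem.List.pyRange 1 (((1:Nat) : Int) + 1) = [1] from by decide]
    rw [show (PySem.List.sorted (List.take 1 "123456789".toList) fun x => x) = ['1'] from by decide]
    simp only [List.all_cons, List.all_nil, show PySem.Int.toStr 1 = Char.toString '1' from by decide, hcnt, Bool.and_true, beq_iff_eq]
    conv_rhs => rw [show (['1'] : List Char) = PySem.List.sorted ['1'] (fun x => x) from by decide]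
    rw [PySem.List.sorted_id_eq_sorted_id_iff_perm, ← counts_perm ['1'] w (by decide) (by simpa using hlen)]
    simp
  · rw [Bool.eq_iff_iff]
    unfold okCount
    rw [show PySem.List.pyRange 1 (((2:Nat) : Int) + 1) = [1,2] from by decide]
    rw [show (PySem.List.sorted (List.take 2 "123456789".toList) fun x => x) = ['1','2'] from by decide]
    simp only [List.all_cons, List.all_nil, show PySem.Int.toStr 1 = Char.toString '1' from by decide, show PySem.Int.toStr 2 = Char.toString '2' from by decide, hcnt, Bool.and_true, Bool.and_eq_true, beq_iff_eq]
    conv_rhs => rw [show (['1','2'] : List Char) = PySem.List.sorted ['1','2'] (fun x => x) from by decide]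
    rw [PySem.List.sorted_id_eq_sorted_id_iff_perm, ← counts_perm ['1','2'] w (by decide) (by simpa using hlen)]
    simp
  · rw [Bool.eq_iff_iff]
    unfold okCount
    rw [show PySem.List.pyRange 1 (((3:Nat) : Int) + 1) = [1,2,3] from by decide]
    rw [show (PySem.List.sorted (List.take 3 "123456789".toList) fun x => x) = ['1','2','3'] from by decide]
    simp only [List.all_cons, List.all_nil, show PySem.Int.toStr 1 = Char.toString '1' from by decide, show PySem.Int.toStr 2 = Char.toString '2' from by decide, show PySem.Int.toStr 3 = Char.toString '3' from by decide, hcnt, Bool.and_true, Bool.and_eq_true, beq_iff_eq]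
    conv_rhs => rw [show (['1','2','3'] : List Char) = PySem.List.sorted ['1','2','3'] (fun x => x) from by decide]
    rw [PySem.List.sorted_id_eq_sorted_id_iff_perm, ← counts_perm ['1','2','3'] w (by decide) (by simpa using hlen)]
    simp
  · rw [Bool.eq_iff_iff]
    unfold okCount
    rw [show PySem.List.pyRange 1 (((4:Nat) : Int) + 1) = [1,2,3,4] from by decide]
    rw [show (PySem.List.sorted (List.take 4 "123456789".toList) fun x => x) = ['1','2','3','4'] from by decide]
    simp only [List.all_cons, List.all_nil, show PySem.Int.toStr 1 = Char.toString '1' from by decide, show PySem.Int.toStr 2 = Char.toString '2' from by decide, show PySem.Int.toStr 3 = Char.toString '3' from by decide, show PySem.Int.toStr 4 = Char.toString '4' from by decide, hcnt, Bool.and_true, Bool.and_eq_true, beq_iff_eq]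
    conv_rhs => rw [show (['1','2','3','4'] : List Char) = PySem.List.sorted ['1','2','3','4'] (fun x => x) from by decide]
    rw [PySem.List.sorted_id_eq_sorted_id_iff_perm, ← counts_perm ['1','2','3','4'] w (by decide) (by simpa using hlen)]
    simp
  · rw [Bool.eq_iff_iff]
    unfold okCount
    rw [show PySem.List.pyRange 1 (((5:Nat) : Int) + 1) = [1,2,3,4,5] from by decide]
    rw [show (PySem.List.sorted (List.take 5 "123456789".toList) fun x => x) = ['1','2','3','4','5'] from by decide]
    simp only [List.all_cons, List.all_nil, show PySem.Int.toStr 1 = Char.toString '1' from by decide, show PySem.Int.toStr 2 = Char.toString '2' from by decide, show PySem.Int.toStr 3 = Char.toString '3' from by decide, show PySem.Int.toStr 4 = Char.toString '4' from by decide, show PySem.Int.toStr 5 = Char.toString '5' from by decide, hcnt, Bool.and_true, Bool.and_eq_true, beq_iff_eq]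
    conv_rhs => rw [show (['1','2','3','4','5'] : List Char) = PySem.List.sorted ['1','2','3','4','5'] (fun x => x) from by decide]
    rw [PySem.List.sorted_id_eq_sorted_id_iff_perm, ← counts_perm ['1','2','3','4','5'] w (by decide) (by simpa using hlen)]
    simp
  · rw [Bool.eq_iff_iff]
    unfold okCount
    rw [show PySem.List.pyRange 1 (((6:Nat) : Int) + 1) = [1,2,3,4,5,6] from by decide]
    rw [show (PySem.List.sorted (List.take 6 "123456789".toList) fun x => x) = ['1','2','3','4','5','6'] from by decide]
    simp only [List.all_cons, List.all_nil, show PySem.Int.toStr 1 = Char.toString '1' from by decide, show PySem.Int.toStr 2 = Char.toString '2' from by decide, show PySem.Int.toStr 3 = Char.toString '3' from by decide, show PySem.Int.toStr 4 = Char.toString '4' from by decide, show PySem.Int.toStr 5 = Char.toString '5' from by decide, show PySem.Int.toStr 6 = Char.toString '6' from by decide, hcnt, Bool.and_true, Bool.and_eq_true, beq_iff_eq]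
    conv_rhs => rw [show (['1','2','3','4','5','6'] : List Char) = PySem.List.sorted ['1','2','3','4','5','6'] (fun x => x) from by decide]
    rw [PySem.List.sorted_id_eq_sorted_id_iff_perm, ← counts_perm ['1','2','3','4','5','6'] w (by decide) (by simpa using hlen)]
    simp
  · rw [Bool.eq_iff_iff]
    unfold okCount
    rw [show PySem.List.pyRange 1 (((7:Nat) : Int) + 1) = [1,2,3,4,5,6,7] from by decide]
    rw [show (PySem.List.sorted (List.take 7 "123456789".toList) fun x => x) = ['1','2','3','4','5','6','7'] from by decide]
    simp only [List.all_cons, List.all_nil, show PySem.Int.toStr 1 = Char.toString '1' from by decide, show PySem.Int.toStr 2 = Char.toString '2' from by decide, show PySem.Int.toStr 3 = Char.toString '3' from by decide, show PySem.Int.toStr 4 = Char.toString '4' from by decide, show PySem.Int.toStr 5 = Char.toString '5' from by decide, show PySem.Int.toStr 6 = Char.toString '6' from by decide, show PySem.Int.toStr 7 = Char.toString '7' from by decide, hcnt, Bool.and_true, Bool.and_eq_true, beq_iff_eq]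
    conv_rhs => rw [show (['1','2','3','4','5','6','7'] : List Char) = PySem.List.sorted ['1','2','3','4','5','6','7'] (fun x => x) from by decide]
    rw [PySem.List.sorted_id_eq_sorted_id_iff_perm, ← counts_perm ['1','2','3','4','5','6','7'] w (by decide) (by simpa using hlen)]
    simp
  · rw [Bool.eq_iff_iff]
    unfold okCount
    rw [show PySem.List.pyRange 1 (((8:Nat) : Int) + 1) = [1,2,3,4,5,6,7,8] from by decide]
    rw [show (PySem.List.sorted (List.take 8 "123456789".toList) fun x => x) = ['1','2','3','4','5','6','7','8'] from by decide]
    simp only [List.all_cons, List.all_nil, show PySem.Int.toStr 1 = Char.toString '1' from by decide, show PySem.Int.toStr 2 = Char.toString '2' from by decide, show PySem.Int.toStr 3 = Char.toString '3' from by decide, show PySem.Int.toStr 4 = Char.toString '4' from by decide, show PySem.Int.toStr 5 = Char.toString '5' from by decide, show PySem.Int.toStr 6 = Char.toString '6' from by decide, show PySem.Int.toStr 7 = Char.toString '7' from by decide, show PySem.Int.toStr 8 = Char.toString '8' from by decide, hcnt, Bool.and_true, Bool.and_eq_true, beq_iff_eq]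
    conv_rhs => rw [show (['1','2','3','4','5','6','7','8'] : List Char) = PySem.List.sorted ['1','2','3','4','5','6','7','8'] (fun x => x) from by decide]
    rw [PySem.List.sorted_id_eq_sorted_id_iff_perm, ← counts_perm ['1','2','3','4','5','6','7','8'] w (by decide) (by simpa using hlen)]
    simp
  · rw [Bool.eq_iff_iff]
    unfold okCount
    rw [show PySem.List.pyRange 1 (((9:Nat) : Int) + 1) = [1,2,3,4,5,6,7,8,9] from by decide]
    rw [show (PySem.List.sorted (List.take 9 "123456789".toList) fun x => x) = ['1','2','3','4','5','6','7','8','9'] from by decide]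
    simp only [List.all_cons, List.all_nil, show PySem.Int.toStr 1 = Char.toString '1' from by decide, show PySem.Int.toStr 2 = Char.toString '2' from by decide, show PySem.Int.toStr 3 = Char.toString '3' from by decide, show PySem.Int.toStr 4 = Char.toString '4' from by decide, show PySem.Int.toStr 5 = Char.toString '5' from by decide, show PySem.Int.toStr 6 = Char.toString '6' from by decide, show PySem.Int.toStr 7 = Char.toString '7' from by decide, show PySem.Int.toStr 8 = Char.toString '8' from by decide, show PySem.Int.toStr 9 = Char.toString '9' from by decide, hcnt, Bool.and_true, Bool.and_eq_true, beq_iff_eq]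
    conv_rhs => rw [show (['1','2','3','4','5','6','7','8','9'] : List Char) = PySem.List.sorted ['1','2','3','4','5','6','7','8','9'] (fun x => x) from by decide]
    rw [PySem.List.sorted_id_eq_sorted_id_iff_perm, ← counts_perm ['1','2','3','4','5','6','7','8','9'] w (by decide) (by simpa using hlen)]
    simp

-- N ≥ 10: is_ok can never hold (the key "10" is never a one-char key)
theorem okCount_false_of_ge10 (N : Int) (hN : 10 ≤ N) (w : List Char) :
    okCount N w = false := by
  unfold okCount
  rw [List.all_eq_false]
  refine ⟨10, PySem.List.mem_pyRange_one.mpr (by omega), ?_⟩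
  have h10 : PySem.Int.toStr 10 = "10" := by decide
  have hc : (w.map Char.toString).count "10" = 0 := by
    rw [List.count_eq_zero]
    intro hmem
    rcases List.mem_map.mp hmem with ⟨c, _, hc⟩
    have := congrArg String.toList hc
    simp at this
  rw [h10, hc]
  decide

theorem pyRange_natCast' : ∀ (k a : Nat),
    PySem.List.pyRange (a : Int) ((a + k : Nat) : Int) = (List.range' a k).map (fun j : Nat => (j : Int)) := by
  intro k
  induction k with
  | zero => intro a; simp [PySem.List.pyRange]
  | succ m ih =>
    intro a
    have h1 : ((a + (m + 1) : Nat) : Int) = ((a + m : Nat) : Int) + 1 := by push_cast; ring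
    have h2 : (a : Int) ≤ ((a + m : Nat) : Int) := by push_cast; omega
    rw [h1, PySem.List.pyRange_one_succ_right h2, ih a]
    have : ∀ j, j ∈ List.range' a m → j < a + m := by
      intro j hj
      have := List.mem_range'_1.mp hj
      omega
    rw [show (List.range' a (m + 1)) = List.range' a m ++ [a + m] from by
      rw [List.range'_1_concat]]
    simp

theorem fold_stepA_nil (N : Int) (cs : List Char) :
    ∀ (idx : List Int) (st : List Char × PySem.Dict String Int × List Char),
      st.1 = [] → st.2.2 = [] →
      (idx.foldl (stepA N cs) st).1 = [] ∧ (idx.foldl (stepA N cs) st).2.2 = [] := by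
  intro idx
  induction idx with
  | nil => intro st h1 h2; exact ⟨h1, h2⟩
  | cons i r ih =>
    intro st h1 h2
    rw [List.foldl_cons]
    apply ih
    · simp [stepA, h1]
    · simp [stepA, h1, h2]

theorem gref_body (ok : List Char → Bool) (a w : List Char) :
    (if ok w && decide (a < w) then w else a) = gRef ok a w := by
  unfold gRef
  cases hok : ok w
  · simp
  · by_cases hlt : a < w <;> simp [hlt]

-- the canonical value both programs compute in the main case
def mainVal (cs : List Char) (n : Nat) (okW : List Char → Bool) : List Char :=
  ((List.range' 0 (cs.length - n + 1)).map (win cs n)).foldl (gRef okW) []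

theorem A_main (s : String) (N : Int) (n : Nat) (hN : N = (n : Int)) (hn1 : 1 ≤ n)
    (hnL : n ≤ s.toList.length) (okW : List Char → Bool)
    (Hok : ∀ w : List Char, w.length = n → okCount N w = okW w) :
    solution s N = (if mainVal s.toList n okW = [] then (-1 : Int)
      else (PySem.Int.ofChars? (mainVal s.toList n okW)).getD 0) := by
  have hnL' : ((n : Nat) : Int) ≤ (s.toList.length : Int) := by exact_mod_cast hnL
  have Hok' : ∀ w : List Char, w.length = n → okCount ((n : Nat) : Int) w = okW w := by
    intro w hw
    rw [← hN]
    exact Hok w hw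
  unfold solution
  rw [if_neg (by omega)]
  simp only []
  rw [hN]
  have hif := init_fold s.toList (PySem.List.pyRange 0 ((n : Nat) : Int)) [] PySem.Dict.empty
  rw [hif]
  have hchars : (PySem.List.pyRange 0 (n : Int)).map (fun i => PySem.List.pyGetD s.toList i ' ')
      = s.toList.take n := by
    rw [PySem.List.pyRange_zero_natCast, List.map_map]
    have h := map_getD_range' s.toList n 0 (by omega)
    simp only [Function.comp_def, PySem.List.pyGetD_natCast]
    rw [List.range_eq_range']
    simpa using h
  have htos : (PySem.List.pyRange 0 (n : Int)).map (fun i => Char.toString (PySem.List.pyGetD s.toList i ' '))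
      = (s.toList.take n).map Char.toString := by
    rw [← hchars, List.map_map]
    rfl
  rw [hchars, htos]
  simp only [List.nil_append]
  set dic0 := ((s.toList.take n).map Char.toString).foldl (fun (d : PySem.Dict String Int) x => d.modify x 0 (· + 1)) PySem.Dict.empty with hdic0
  have hinv0 : InvD dic0 (s.toList.take n) := by
    intro k
    rw [hdic0, PySem.Dict.getD_foldl_modify_add_one]
    simp [PySem.Dict.getD_empty]
  have hlent : (s.toList.take n).length = n := by
    rw [List.length_take]
    omega
  have hok0 : isOkA ((n : Nat) : Int) dic0 = okW (s.toList.take n) := by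
    rw [isOkA_eq_okCount _ _ _ hinv0]
    exact Hok' _ hlent
  rw [hok0]
  have hidx : PySem.List.pyRange ((n : Nat) : Int) ((s.toList.length : Int))
      = (List.range' n (s.toList.length - n)).map (fun j : Nat => (j : Int)) := by
    rw [show ((s.toList.length : Int)) = ((n + (s.toList.length - n) : Nat) : Int) from by omega]
    exact pyRange_natCast' (s.toList.length - n) n
  rw [hidx, stepA_eq_step2]
  have hdropchars : ((List.range' n (s.toList.length - n)).map (fun j : Nat => (j : Int))).map
      (fun i => PySem.List.pyGetD s.toList i ' ') = s.toList.drop n := by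
    rw [List.map_map]
    simp only [Function.comp_def, PySem.List.pyGetD_natCast]
    rw [map_getD_range' s.toList (s.toList.length - n) n (by omega)]
    have hld : (s.toList.drop n).length = s.toList.length - n := by
      rw [List.length_drop]
    rw [← hld, List.take_length]
  rw [hdropchars]
  rw [loopA ((n : Nat) : Int) okW n Hok' (s.toList.drop n) (s.toList.take n) dic0 _ hlent hn1 hinv0]
  have hw0 : win s.toList n 0 = s.toList.take n := by simp [win]
  have hwins := winsFrom_eq s.toList n hn1 (s.toList.length - n) 0 (by omega)
  simp only [Nat.add_zero, Nat.zero_add, hw0] at hwins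
  rw [hwins]
  have hinit : (if okW (s.toList.take n) then s.toList.take n else [])
      = gRef okW [] (s.toList.take n) := by
    have hne : ([] : List Char) < s.toList.take n := by
      cases h : s.toList.take n with
      | nil => rw [h] at hlent; simp at hlent; omega
      | cons a t => exact List.nil_lt_cons a t
    by_cases hOk : okW (s.toList.take n) <;> simp [gRef, hOk, hne]
  rw [hinit]
  have hfin : ((List.range' 1 (s.toList.length - n)).map (win s.toList n)).foldl (gRef okW)
      (gRef okW [] (s.toList.take n)) = mainVal s.toList n okW := by
    unfold mainVal
    rw [show s.toList.length - n + 1 = (s.toList.length - n) + 1 from rfl, List.range'_succ]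
    simp only [List.map_cons, List.foldl_cons, Nat.zero_add, hw0]
  rw [hfin]

def okB (n : Nat) : List Char → Bool :=
  fun w => PySem.List.sorted w (fun x => x) == PySem.List.sorted ("123456789".toList.take n) (fun x => x)

theorem B_main (s : String) (N : Int) (n : Nat) (hN : N = (n : Int)) (hn1 : 1 ≤ n) (hn9 : n ≤ 9)
    (hnL : n ≤ s.toList.length) :
    solution_alt s N = (if mainVal s.toList n (okB n) = [] then (-1 : Int)
      else (PySem.Int.ofChars? (mainVal s.toList n (okB n))).getD 0) := by
  have hnL' : (n : Int) ≤ (s.toList.length : Int) := by exact_mod_cast hnL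
  unfold solution_alt
  have hcond : (decide (N < 1) || decide (9 < N) || decide ((s.toList.length : Int) < N)) = false := by
    simp only [Bool.or_eq_false_iff, decide_eq_false_iff_not, not_lt]
    omega
  simp only []
  simp only [hcond]
  rw [if_neg (by simp)]
  rw [hN]
  rw [show ((s.toList.length : Int) - (n : Int) + 1) = ((s.toList.length - n + 1 : Nat) : Int) from by omega]
  rw [PySem.List.pyRange_zero_natCast, List.foldl_map]
  have hfold : List.foldl (fun (x : List Char) (y : Nat) =>
        if ((PySem.List.sorted (PySem.List.slice s.toList (some (y : Int)) (some ((y : Int) + (n : Int)))) (fun x => x)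
              == PySem.List.sorted (PySem.List.slice "123456789".toList none (some (n : Int))) (fun x => x))
            && decide (x < PySem.List.slice s.toList (some (y : Int)) (some ((y : Int) + (n : Int))))) = true then
          PySem.List.slice s.toList (some (y : Int)) (some ((y : Int) + (n : Int)))
        else x) [] (List.range (s.toList.length - n + 1))
      = mainVal s.toList n (okB n) := by
    have hfun : (fun (x : List Char) (y : Nat) =>
        if ((PySem.List.sorted (PySem.List.slice s.toList (some (y : Int)) (some ((y : Int) + (n : Int)))) (fun x => x)
              == PySem.List.sorted (PySem.List.slice "123456789".toList none (some (n : Int))) (fun x => x))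
            && decide (x < PySem.List.slice s.toList (some (y : Int)) (some ((y : Int) + (n : Int))))) = true then
          PySem.List.slice s.toList (some (y : Int)) (some ((y : Int) + (n : Int)))
        else x)
        = (fun x y => gRef (okB n) x (win s.toList n y)) := by
      funext x y
      rw [PySem.List.slice_to "123456789".toList (Int.natCast_nonneg n), Int.toNat_natCast]
      rw [show ((y : Int) + (n : Int)) = ((y + n : Nat) : Int) from by push_cast; ring,
        PySem.List.slice_natCast, Nat.add_sub_cancel_left]
      have hg := gref_body (okB n) x ((s.toList.drop y).take n)
      unfold okB at hg
      exact hg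
    rw [hfun]
    rw [← List.foldl_map, List.range_eq_range']
    rfl
  rw [hfold]

theorem A_of_len_lt (s : String) (N : Int) (h : (s.toList.length : Int) < N) :
    solution s N = -1 := by
  unfold solution
  rw [if_pos h]

theorem B_of_guard (s : String) (N : Int) (h : N < 1 ∨ 9 < N ∨ (s.toList.length : Int) < N) :
    solution_alt s N = -1 := by
  unfold solution_alt
  have hcond : (decide (N < 1) || decide (9 < N) || decide ((s.toList.length : Int) < N)) = true := by
    simp only [Bool.or_eq_true, decide_eq_true_eq]
    tauto
  simp only [hcond]
  rfl

theorem A_of_nonpos (s : String) (N : Int) (h : N ≤ 0) : solution s N = -1 := by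
  unfold solution
  rw [if_neg (by omega)]
  simp only []
  rw [PySem.List.pyRange_one_eq_nil h]
  simp only [List.foldl_nil, isOkA, PySem.List.pyRange_one_eq_nil (by omega : N + 1 ≤ 1),
    List.all_nil, if_pos trivial]
  have hf := fold_stepA_nil N s.toList (PySem.List.pyRange N (s.toList.length : Int))
    (([], PySem.Dict.empty, []) : List Char × PySem.Dict String Int × List Char) rfl rfl
  rw [if_pos hf.2]

theorem mainVal_false (cs : List Char) (n : Nat) : mainVal cs n (fun _ => false) = [] := by
  unfold mainVal
  induction ((List.range' 0 (cs.length - n + 1)).map (win cs n)) with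
  | nil => rfl
  | cons a t ih => simpa [gRef] using ih

-- ===== VERDICT (by name: the statement is the Claim_ definition above) =====
theorem solution_spec : Claim_equal_solution := by
  unfold Claim_equal_solution Spec_solution
  intro s N _hdom _hpre
  by_cases hlt : (s.toList.length : Int) < N
  · rw [A_of_len_lt s N hlt, B_of_guard s N (Or.inr (Or.inr hlt))]
  · by_cases hnp : N ≤ 0
    · rw [A_of_nonpos s N hnp, B_of_guard s N (Or.inl (by omega))]
    · by_cases h9 : 9 < N
      · -- N ≥ 10 : is_ok never holds, both sides give -1
        have hA := A_main s N N.toNat (by omega) (by omega) (by omega) (fun _ => false)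
          (fun w _ => okCount_false_of_ge10 N (by omega) w)
        rw [hA, mainVal_false, if_pos rfl, B_of_guard s N (Or.inr (Or.inl h9))]
      · -- main case 1 ≤ N ≤ 9 ≤ len
        have hN : N = (N.toNat : Int) := by omega
        have hA := A_main s N N.toNat hN (by omega) (by omega) (okB N.toNat)
          (fun w hw => by
            rw [hN]
            exact okCount_eq_sortcheck N.toNat (by omega) (by omega) w hw)
        have hB := B_main s N N.toNat hN (by omega) (by omega) (by omega)
        rw [hA, hB]
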